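-- pv_equiv track=rewrite | github.com/ehsanik/muscleTorch | utils/visualization_util.py | get_moving_not_moving
-- ===== SOURCE A (Python) =====
-- def get_moving_not_moving(move_labels, mask, imu_names, correctness):
--     assert len(imu_names) == len(move_labels)
--     moving_correct = []
--     not_moving_correct = []
--     moving_wrong = []
--     not_moving_wrong = []
--     for i in range(len(move_labels)):
--         if not mask[i]:
--             if move_labels[i] == 0:
--                 if correctness[i]:
--                     not_moving_correct.append(imu_names[i])
--                 else:
--                     not_moving_wrong.append(imu_names[i])
--             elif move_labels[i] == 1:
--                 if correctness[i]:
--                     moving_correct.append(imu_names[i])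
--                 else:
--                     moving_wrong.append(imu_names[i])
--     return moving_correct, not_moving_correct, moving_wrong, not_moving_wrong
-- ===== SOURCE B (Python) =====
-- def get_moving_not_moving(move_labels, mask, imu_names, correctness):
--     assert len(imu_names) == len(move_labels)
--     rows = list(zip(move_labels, mask, imu_names, correctness))
--
--     def bucket(lab, ok):
--         return [name for m, msk, name, c in rows if not msk and m == lab and bool(c) == ok]
--
--     return bucket(1, True), bucket(0, True), bucket(1, False), bucket(0, False)
-- ===== Notes on version B (the rewrite author's own statement) =====
-- stated objective: idiomatic
-- what changed: Replaces the single index loop with nested if/elif branches by zipping the four lists once into rows and computing each of the four buckets as its own filtered comprehension over the rows.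
-- outside the precondition, e.g. on get_moving_not_moving([2], [False], ['a'], []): A returns ([], [], [], []), B returns ([], [], [], [])
import Mathlib
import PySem

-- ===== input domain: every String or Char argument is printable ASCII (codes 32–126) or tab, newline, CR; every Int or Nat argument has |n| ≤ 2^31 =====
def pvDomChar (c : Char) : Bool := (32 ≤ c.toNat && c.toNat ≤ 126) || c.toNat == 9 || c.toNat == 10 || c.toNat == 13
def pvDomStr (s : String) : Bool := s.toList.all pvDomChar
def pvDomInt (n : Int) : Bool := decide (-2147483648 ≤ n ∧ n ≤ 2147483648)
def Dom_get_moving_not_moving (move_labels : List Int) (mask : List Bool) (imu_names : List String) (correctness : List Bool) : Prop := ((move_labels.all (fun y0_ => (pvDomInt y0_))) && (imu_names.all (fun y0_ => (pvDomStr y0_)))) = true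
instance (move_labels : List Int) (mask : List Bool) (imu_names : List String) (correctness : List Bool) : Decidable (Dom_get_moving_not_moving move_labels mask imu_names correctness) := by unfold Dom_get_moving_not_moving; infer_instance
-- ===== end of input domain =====

-- B replaces the index loop with nested branches by one zip of the four lists and four
-- filtered comprehensions, one per bucket (objective: idiomatic; same O(n) cost).

-- ===== PORT A =====
-- Literal port of A's indexed loop; pyGetD defaults are unreachable under Pre_ (indices in range).
def get_moving_not_moving (move_labels : List Int) (mask : List Bool) (imu_names : List String) (correctness : List Bool) : List String × List String × List String × List String :=
  (PySem.List.pyRange 0 (move_labels.length : Int) 1).foldl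
    (fun acc i =>
      if (PySem.List.pyGetD mask i false) = false then
        if (PySem.List.pyGetD move_labels i 0) = 0 then
          if (PySem.List.pyGetD correctness i false) = true then
            (acc.1, acc.2.1 ++ [PySem.List.pyGetD imu_names i ""], acc.2.2.1, acc.2.2.2)
          else
            (acc.1, acc.2.1, acc.2.2.1, acc.2.2.2 ++ [PySem.List.pyGetD imu_names i ""])
        else if (PySem.List.pyGetD move_labels i 0) = 1 then
          if (PySem.List.pyGetD correctness i false) = true then
            (acc.1 ++ [PySem.List.pyGetD imu_names i ""], acc.2.1, acc.2.2.1, acc.2.2.2)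
          else
            (acc.1, acc.2.1, acc.2.2.1 ++ [PySem.List.pyGetD imu_names i ""], acc.2.2.2)
        else acc
      else acc)
    ([], [], [], [])

-- ===== PORT B =====
-- Port of Source B: zip the four lists into rows, then one filtered comprehension per bucket.
def pvBucket (rows : List (Int × Bool × String × Bool)) (lab : Int) (ok : Bool) : List String :=
  rows.filterMap (fun r => if r.2.1 = false ∧ r.1 = lab ∧ r.2.2.2 = ok then some r.2.2.1 else none)

def get_moving_not_moving_alt (move_labels : List Int) (mask : List Bool) (imu_names : List String) (correctness : List Bool) : List String × List String × List String × List String :=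
  let rows := move_labels.zip (mask.zip (imu_names.zip correctness))
  (pvBucket rows 1 true, pvBucket rows 0 true, pvBucket rows 1 false, pvBucket rows 0 false)

-- ===== PRECONDITION & SPEC =====
-- Pre_ excludes inputs where the lists have mismatching lengths: A raises AssertionError when
-- len(imu_names) ≠ len(move_labels) and generally IndexError when mask or correctness is shorter
-- than move_labels — except on accidental corners where the short list is never indexed (A then
-- returns; see the cite), an artefact of lazy indexing.
def Pre_get_moving_not_moving (move_labels : List Int) (mask : List Bool) (imu_names : List String) (correctness : List Bool) : Prop :=
  imu_names.length = move_labels.length ∧ move_labels.length ≤ mask.length ∧ move_labels.length ≤ correctness.length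
instance (move_labels : List Int) (mask : List Bool) (imu_names : List String) (correctness : List Bool) : Decidable (Pre_get_moving_not_moving move_labels mask imu_names correctness) := by unfold Pre_get_moving_not_moving; infer_instance

def pvWitness_get_moving_not_moving : List Int × List Bool × List String × List Bool :=
  ([0, 1, 2, 1], [false, false, true, false], ["a", "b", "c", "d"], [true, false, true, true])

def Spec_get_moving_not_moving (move_labels : List Int) (mask : List Bool) (imu_names : List String) (correctness : List Bool) (out : List String × List String × List String × List String) : Prop := out = get_moving_not_moving_alt move_labels mask imu_names correctness
instance (move_labels : List Int) (mask : List Bool) (imu_names : List String) (correctness : List Bool) (out : List String × List String × List String × List String) : Decidable (Spec_get_moving_not_moving move_labels mask imu_names correctness out) := by unfold Spec_get_moving_not_moving; infer_instance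

-- ===== CLAIM (what is proved, stated in full; the proofs are below) =====
def Claim_equal_get_moving_not_moving : Prop := ∀ (move_labels : List Int) (mask : List Bool) (imu_names : List String) (correctness : List Bool), Dom_get_moving_not_moving move_labels mask imu_names correctness → Pre_get_moving_not_moving move_labels mask imu_names correctness → Spec_get_moving_not_moving move_labels mask imu_names correctness (get_moving_not_moving move_labels mask imu_names correctness)

-- ===== LEMMAS AND PROOFS =====

-- A's loop step as a function of one row (move label, mask bit, name, correctness bit).
def pvStep (acc : List String × List String × List String × List String) (r : Int × Bool × String × Bool) : List String × List String × List String × List String :=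
  if r.2.1 = false then
    if r.1 = 0 then
      if r.2.2.2 = true then (acc.1, acc.2.1 ++ [r.2.2.1], acc.2.2.1, acc.2.2.2)
      else (acc.1, acc.2.1, acc.2.2.1, acc.2.2.2 ++ [r.2.2.1])
    else if r.1 = 1 then
      if r.2.2.2 = true then (acc.1 ++ [r.2.2.1], acc.2.1, acc.2.2.1, acc.2.2.2)
      else (acc.1, acc.2.1, acc.2.2.1 ++ [r.2.2.1], acc.2.2.2)
    else acc
  else acc

-- Folding pvStep over any row list yields the four buckets appended to the accumulators.
lemma pvFold_eq_buckets (rows : List (Int × Bool × String × Bool))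
    (a b c d : List String) :
    rows.foldl pvStep (a, b, c, d) =
      (a ++ pvBucket rows 1 true, b ++ pvBucket rows 0 true,
       c ++ pvBucket rows 1 false, d ++ pvBucket rows 0 false) := by
  induction rows generalizing a b c d with
  | nil => simp [pvBucket]
  | cons r rs ih =>
    obtain ⟨m, msk, name, cor⟩ := r
    simp only [List.foldl_cons, pvStep, pvBucket, List.filterMap_cons]
    by_cases hmsk : msk = false <;> by_cases hm0 : m = 0 <;> by_cases hm1 : m = 1 <;>
      by_cases hc : cor = true <;>
      simp_all [pvStep, pvBucket, ih]

-- The indexed reads of A's loop, tabulated over the range, are exactly B's zipped rows.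
lemma pvRows_eq (mv : List Int) (mk : List Bool) (im : List String) (cr : List Bool)
    (h1 : im.length = mv.length) (h2 : mv.length ≤ mk.length) (h3 : mv.length ≤ cr.length) :
    (PySem.List.pyRange 0 (mv.length : Int) 1).map
      (fun i => (PySem.List.pyGetD mv i 0, PySem.List.pyGetD mk i false,
                 PySem.List.pyGetD im i "", PySem.List.pyGetD cr i false)) =
    mv.zip (mk.zip (im.zip cr)) := by
  apply List.ext_getElem
  · simp [PySem.List.length_pyRange_one]
    omega
  · intro k hk1 hk2
    simp only [List.getElem_map]
    have hk : k < mv.length := by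
      simpa [PySem.List.length_pyRange_one] using hk1
    rw [PySem.List.getElem_pyRange_one]
    have hgz : (0 : Int) + (k : Int) = (k : Nat) := by push_cast; ring
    rw [hgz]
    simp only [PySem.List.pyGetD_natCast]
    rw [List.getElem_zip, List.getElem_zip, List.getElem_zip]
    congr 1
    · exact List.getD_eq_getElem _ _ (by omega)
    congr 1
    · exact List.getD_eq_getElem _ _ (by omega)
    congr 1
    · exact List.getD_eq_getElem _ _ (by omega)
    · exact List.getD_eq_getElem _ _ (by omega)

-- ===== VERDICT (by name: the statement is the Claim_ definition above) =====
theorem get_moving_not_moving_spec : Claim_equal_get_moving_not_moving := by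
  intro mv mk im cr _hdom hpre
  obtain ⟨h1, h2, h3⟩ := hpre
  show get_moving_not_moving mv mk im cr = get_moving_not_moving_alt mv mk im cr
  unfold get_moving_not_moving get_moving_not_moving_alt
  have hmap := pvRows_eq mv mk im cr h1 h2 h3
  calc (PySem.List.pyRange 0 (mv.length : Int) 1).foldl
        (fun acc i =>
          if (PySem.List.pyGetD mk i false) = false then
            if (PySem.List.pyGetD mv i 0) = 0 then
              if (PySem.List.pyGetD cr i false) = true then
                (acc.1, acc.2.1 ++ [PySem.List.pyGetD im i ""], acc.2.2.1, acc.2.2.2)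
              else
                (acc.1, acc.2.1, acc.2.2.1, acc.2.2.2 ++ [PySem.List.pyGetD im i ""])
            else if (PySem.List.pyGetD mv i 0) = 1 then
              if (PySem.List.pyGetD cr i false) = true then
                (acc.1 ++ [PySem.List.pyGetD im i ""], acc.2.1, acc.2.2.1, acc.2.2.2)
              else
                (acc.1, acc.2.1, acc.2.2.1 ++ [PySem.List.pyGetD im i ""], acc.2.2.2)
            else acc
          else acc)
        ([], [], [], [])
      = ((PySem.List.pyRange 0 (mv.length : Int) 1).map
          (fun i => (PySem.List.pyGetD mv i 0, PySem.List.pyGetD mk i false,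
                     PySem.List.pyGetD im i "", PySem.List.pyGetD cr i false))).foldl
          pvStep ([], [], [], []) := by
        rw [List.foldl_map]
        rfl
    _ = (mv.zip (mk.zip (im.zip cr))).foldl pvStep ([], [], [], []) := by rw [hmap]
    _ = _ := by
        rw [pvFold_eq_buckets]
        simp
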